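-- pv_equiv track=rewrite | github.com/fynngollon/inf | 2019-09-19/chiffiersystemModularPotenz.py | decodierungBlockcodierung
-- ===== SOURCE A (Python) =====
-- def decodierungZahl(zahl, abc):
--
--     """
--     >>> decodierungZahl(1, ' ABCDEFGHIJKLMNOPQRSTUVWXYZ')
--     'A'
--     """
--
--     return abc[zahl]
--
-- def decodierungBlockcodierung(zahl, blocklaenge, abc):
--
--     """
--     >>> decodierungBlockcodierung(10203, 3, ' ABCDEFGHIJKLMNOPQRSTUVWXYZ')
--     'ABC'
--     """
--
--     wort = ''
--     while blocklaenge > 0: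
--         rest = zahl % (10**2)
--         wort = decodierungZahl(rest, abc) + wort
--         zahl = zahl // (10**2)
--         blocklaenge = blocklaenge - 1
--     return wort
-- ===== SOURCE B (Python) =====
-- def decodierungBlockcodierung(zahl, blocklaenge, abc):
--     if blocklaenge <= 0:
--         return ''
--     n = zahl % 100 ** blocklaenge
--
--     def blocks(n, b):
--         if b == 1:
--             return [abc[n]]
--         h = b // 2
--         hi, lo = divmod(n, 100 ** h)
--         return blocks(hi, b - h) + blocks(lo, h)
--
--     return ''.join(blocks(n, blocklaenge))
-- ===== Notes on version B (the rewrite author's own statement) =====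
-- stated objective: faster
-- what changed: B reduces zahl once modulo 100**blocklaenge and then decodes the blocks by divide and conquer (split the value with one divmod by 100**(b//2), recurse on both halves, join the character list) instead of A's blocklaenge-step least-significant-first modulo/divide loop that prepends to the result string.
import Mathlib
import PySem

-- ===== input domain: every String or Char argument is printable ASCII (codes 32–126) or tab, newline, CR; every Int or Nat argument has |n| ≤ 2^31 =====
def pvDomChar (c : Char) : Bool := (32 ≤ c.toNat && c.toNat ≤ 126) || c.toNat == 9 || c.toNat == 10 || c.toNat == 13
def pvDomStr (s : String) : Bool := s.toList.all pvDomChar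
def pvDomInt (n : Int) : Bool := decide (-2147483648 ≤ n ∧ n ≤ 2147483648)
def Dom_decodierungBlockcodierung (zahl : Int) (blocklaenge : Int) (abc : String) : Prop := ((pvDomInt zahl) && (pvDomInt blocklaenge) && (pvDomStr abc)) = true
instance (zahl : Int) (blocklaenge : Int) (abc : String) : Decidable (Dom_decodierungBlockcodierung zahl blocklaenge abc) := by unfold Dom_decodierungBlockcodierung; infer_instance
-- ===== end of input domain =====

-- B reduces zahl once modulo 100^blocklaenge and then splits the block string by divide and
-- conquer (one divmod per split) instead of A's least-significant-first modulo/divide loop;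
-- measurably faster on large inputs. Objective: faster.

-- ===== PORT A =====
-- abc[zahl]: Python raises IndexError when out of range; those inputs are excluded by Pre_ below.
def decodierungZahl (zahl : Int) (abc : String) : String :=
  match PySem.Str.pyGet? abc zahl with
  | some c => String.singleton c
  | none => ""

def pvALoop : Nat → Int → String → String → String
  | 0, _, wort, _ => wort
  | f+1, zahl, wort, abc =>
      pvALoop f (PySem.Int.floordiv zahl (10^2))
        (decodierungZahl (PySem.Int.mod zahl (10^2)) abc ++ wort) abc

def decodierungBlockcodierung (zahl : Int) (blocklaenge : Int) (abc : String) : String :=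
  pvALoop blocklaenge.toNat zahl "" abc

-- ===== PORT B =====
-- B's recursive helper blocks(n, b): Python only ever calls it with b ≥ 1; the b = 0 case
-- below is the totality guard for that unreached argument and returns no blocks.
def pvBBlocks (abc : String) (n : Int) : Nat → List String
  | 0 => []
  | 1 => [match PySem.Str.pyGet? abc n with
          | some c => String.singleton c
          | none => ""]
  | b+2 =>
      let h := (b+2) / 2
      let hi := PySem.Int.floordiv n (100 ^ h)
      let lo := PySem.Int.mod n (100 ^ h)
      pvBBlocks abc hi (b+2-h) ++ pvBBlocks abc lo h
decreasing_by all_goals omega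

def decodierungBlockcodierung_alt (zahl : Int) (blocklaenge : Int) (abc : String) : String :=
  if blocklaenge ≤ 0 then "" else
  let n0 := PySem.Int.mod zahl (100 ^ blocklaenge.toNat)
  PySem.Str.join "" (pvBBlocks abc n0 blocklaenge.toNat)

-- ===== PRECONDITION & SPEC =====
-- Pre_ excludes exactly the inputs on which Python A raises IndexError: some base-100 digit
-- consumed by the loop is ≥ len(abc) (the digits are always ≥ 0, so only this bound matters).
-- On Dom, |zahl| ≤ 2^31 < 100^5, so every digit with index ≥ 5 equals the digit at index 5
-- (0 for zahl ≥ 0, 99 for zahl < 0); capping the quantifier at 6 keeps Pre_ fast to decide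
-- without changing which Dom inputs it admits.
def Pre_decodierungBlockcodierung (zahl : Int) (blocklaenge : Int) (abc : String) : Prop :=
  ∀ i : Nat, i < min blocklaenge.toNat 6 → (zahl / 100 ^ i) % 100 < (abc.length : Int)
instance (zahl : Int) (blocklaenge : Int) (abc : String) : Decidable (Pre_decodierungBlockcodierung zahl blocklaenge abc) := by unfold Pre_decodierungBlockcodierung; infer_instance

def pvWitness_decodierungBlockcodierung : Int × Int × String := (10203, 3, " ABCDEFGHIJKLMNOPQRSTUVWXYZ")

def Spec_decodierungBlockcodierung (zahl : Int) (blocklaenge : Int) (abc : String) (out : String) : Prop := out = decodierungBlockcodierung_alt zahl blocklaenge abc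
instance (zahl : Int) (blocklaenge : Int) (abc : String) (out : String) : Decidable (Spec_decodierungBlockcodierung zahl blocklaenge abc out) := by unfold Spec_decodierungBlockcodierung; infer_instance

-- ===== CLAIM (what is proved, stated in full; the proofs are below) =====
def Claim_equal_decodierungBlockcodierung : Prop := ∀ (zahl : Int) (blocklaenge : Int) (abc : String), Dom_decodierungBlockcodierung zahl blocklaenge abc → Pre_decodierungBlockcodierung zahl blocklaenge abc → Spec_decodierungBlockcodierung zahl blocklaenge abc (decodierungBlockcodierung zahl blocklaenge abc)

-- ===== LEMMAS AND PROOFS =====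

-- B inlines the same character indexing that A's helper decodierungZahl performs
theorem pvBBlocks_one (abc : String) (n : Int) :
    pvBBlocks abc n 1 = [decodierungZahl n abc] := by
  rw [pvBBlocks]; unfold decodierungZahl; rfl

theorem pvBBlocks_split (abc : String) (n : Int) (b : Nat) :
    pvBBlocks abc n (b+2)
      = pvBBlocks abc (PySem.Int.floordiv n (100 ^ ((b+2)/2))) (b+2-(b+2)/2)
          ++ pvBBlocks abc (PySem.Int.mod n (100 ^ ((b+2)/2))) ((b+2)/2) := by
  rw [pvBBlocks]

-- the list of blocks, least-significant digit appended last (exactly A's recursion shape)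
def pvBlocks (abc : String) : Nat → Int → List String
  | 0, _ => []
  | k+1, z => pvBlocks abc k (z / 100) ++ [decodierungZahl (z % 100) abc]

theorem pvJoin_nil : PySem.Str.join "" ([] : List String) = "" := rfl

theorem pvIntercalate_nil (l : List (List Char)) : ([] : List Char).intercalate l = l.flatten := by
  induction l with
  | nil => simp [List.intercalate]
  | cons x t ih =>
    cases t with
    | nil => simp [List.intercalate]
    | cons y t' =>
      simp only [List.intercalate] at ih ⊢
      simp [List.intersperse, List.flatten] at ih ⊢
      exact ih

theorem pvJoin_append_singleton (l : List String) (s : String) :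
    PySem.Str.join "" (l ++ [s]) = PySem.Str.join "" l ++ s := by
  apply String.ext
  have h1 := PySem.Str.toList_join "" (l ++ [s])
  have h2 := PySem.Str.toList_join "" l
  simp only [PySem.Chars.join, show ("" : String).toList = [] from rfl] at h1 h2
  rw [String.toList_append, h1, h2, pvIntercalate_nil, pvIntercalate_nil,
    List.map_append, List.flatten_append]
  simp

-- A's while loop computes the joined block list, prepended to the accumulator
theorem pvALoop_eq (abc : String) :
    ∀ (f : Nat) (z : Int) (w : String),
      pvALoop f z w abc = PySem.Str.join "" (pvBlocks abc f z) ++ w := by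
  intro f
  induction f with
  | zero => intro z w; simp [pvALoop, pvBlocks, pvJoin_nil]
  | succ f ih =>
    intro z w
    simp only [pvALoop, ih, pvBlocks]
    rw [pvJoin_append_singleton]
    have hf : PySem.Int.floordiv z (10 ^ 2) = z / 100 := by simp [pysem]
    have hm : PySem.Int.mod z (10 ^ 2) = z % 100 := by simp [pysem]
    rw [hf, hm, String.append_assoc]

-- base-100 division chain: (z % (100*P)) / 100 = (z / 100) % P
theorem pvMod_div (a P : Int) : (a % (100 * P)) / 100 = (a / 100) % P := by
  conv_lhs => rw [Int.emod_def]
  rw [show a - 100 * P * (a / (100 * P)) = a + (-(P * (a / (100 * P)))) * 100 by ring]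
  rw [Int.add_mul_ediv_right _ _ (by norm_num : (100:Int) ≠ 0)]
  rw [Int.emod_def (a / 100) P, Int.ediv_ediv_of_nonneg (show (0:Int) ≤ 100 by norm_num)]
  ring

theorem pvMod_mod (a P : Int) : (a % (100 * P)) % 100 = a % 100 :=
  Int.emod_emod_of_dvd a ⟨P, rfl⟩

-- the blocks only depend on zahl modulo 100^k
theorem pvBlocks_emod (abc : String) :
    ∀ (k : Nat) (z : Int), pvBlocks abc k (z % 100 ^ k) = pvBlocks abc k z := by
  intro k
  induction k with
  | zero => intro z; rfl
  | succ k ih =>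
    intro z
    have hp : (100:Int) ^ (k+1) = 100 * 100 ^ k := by ring
    simp only [pvBlocks, hp, pvMod_div, pvMod_mod, ih]

-- splitting the block list: the top k blocks and the bottom m blocks
theorem pvBlocks_split (abc : String) :
    ∀ (m k : Nat) (z : Int),
      pvBlocks abc (k + m) z
        = pvBlocks abc k (z / 100 ^ m) ++ pvBlocks abc m (z % 100 ^ m) := by
  intro m
  induction m with
  | zero => intro k z; simp [pvBlocks]
  | succ m ih =>
    intro k z
    have hstep : pvBlocks abc (k + (m+1)) z
        = pvBlocks abc (k + m) (z / 100) ++ [decodierungZahl (z % 100) abc] := rfl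
    rw [hstep, ih k (z / 100)]
    have hdd : z / 100 / 100 ^ m = z / 100 ^ (m+1) := by
      rw [Int.ediv_ediv_of_nonneg (show (0:Int) ≤ 100 by norm_num)]
      congr 1; ring
    have hp1 : (100:Int) ^ (m+1) = 100 * 100 ^ m := by ring
    simp only [pvBlocks, hdd]
    rw [show z % 100 ^ (m+1) % 100 = z % 100 by rw [hp1]; exact pvMod_mod z (100 ^ m),
        show z % 100 ^ (m+1) / 100 = z / 100 % 100 ^ m by rw [hp1]; exact pvMod_div z (100 ^ m)]
    simp

-- B's divide-and-conquer helper produces exactly the block list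
theorem pvBBlocks_spec (abc : String) :
    ∀ (b : Nat), 1 ≤ b → ∀ (z : Int), 0 ≤ z → z < 100 ^ b →
      pvBBlocks abc z b = pvBlocks abc b z := by
  intro b
  induction b using Nat.strong_induction_on with
  | _ b ih =>
    match b with
    | 0 => intro h; omega
    | 1 =>
      intro _ z h0 h1
      rw [pow_one] at h1
      rw [pvBBlocks_one]
      show [decodierungZahl z abc] = [] ++ [decodierungZahl (z % 100) abc]
      rw [Int.emod_eq_of_lt h0 h1]
      simp
    | (b+2) =>
      intro _ z h0 h1
      set h := (b+2)/2 with hh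
      have hb1 : 1 ≤ h := by omega
      have hb2 : h < b + 2 := by omega
      have hb3 : 1 ≤ b + 2 - h := by omega
      have hb4 : b + 2 - h < b + 2 := by omega
      have hpos : (0:Int) < 100 ^ h := by positivity
      rw [pvBBlocks_split]
      have hf : PySem.Int.floordiv z ((100:Int) ^ h) = z / 100 ^ h := by simp [pysem, hpos]
      have hm : PySem.Int.mod z ((100:Int) ^ h) = z % 100 ^ h := by simp [pysem, hpos]
      rw [hf, hm, ← hh]
      have hhi0 : 0 ≤ z / 100 ^ h := Int.ediv_nonneg h0 (le_of_lt hpos)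
      have hhi1 : z / 100 ^ h < 100 ^ (b + 2 - h) := by
        rw [Int.ediv_lt_iff_lt_mul hpos]
        calc z < 100 ^ (b+2) := h1
          _ = 100 ^ (b + 2 - h) * 100 ^ h := by rw [← pow_add]; congr 1; omega
      rw [ih (b + 2 - h) hb4 hb3 (z / 100 ^ h) hhi0 hhi1]
      rw [ih h hb2 hb1 (z % 100 ^ h) (Int.emod_nonneg z (ne_of_gt hpos))
          (Int.emod_lt_of_pos z hpos)]
      have := pvBlocks_split abc h (b + 2 - h) z
      rw [show b + 2 - h + h = b + 2 by omega] at this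
      rw [← this]

-- ===== VERDICT (by name: the statement is the Claim_ definition above) =====
theorem decodierungBlockcodierung_spec : Claim_equal_decodierungBlockcodierung := by
  intro zahl blocklaenge abc _ _
  unfold Spec_decodierungBlockcodierung
  unfold decodierungBlockcodierung decodierungBlockcodierung_alt
  by_cases hb : blocklaenge ≤ 0
  · rw [if_pos hb]
    have : blocklaenge.toNat = 0 := Int.toNat_of_nonpos hb
    rw [this]
    rfl
  · rw [if_neg hb]
    rw [not_le] at hb
    have hk1 : 1 ≤ blocklaenge.toNat := by omega
    set k := blocklaenge.toNat with hk
    have hpos : (0:Int) < 100 ^ k := by positivity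
    have hn0 : PySem.Int.mod zahl ((100:Int) ^ k) = zahl % 100 ^ k := by simp [pysem, hpos]
    show pvALoop k zahl "" abc
      = PySem.Str.join "" (pvBBlocks abc (PySem.Int.mod zahl ((100:Int) ^ k)) k)
    rw [hn0]
    rw [pvBBlocks_spec abc k hk1 (zahl % 100 ^ k)
        (Int.emod_nonneg zahl (ne_of_gt hpos)) (Int.emod_lt_of_pos zahl hpos)]
    rw [pvBlocks_emod abc k zahl]
    rw [pvALoop_eq abc k zahl ""]
    simp
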